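-- pv_equiv track=rewrite | github.com/FabianJuarez182/CFG-to-CNF | CNFParser.py | check_1_char
-- ===== SOURCE A (Python) =====
-- def check_1_char(string, T):
--     flag = False
--     c = string[0]
--     for ch in string:
--         if c in T and c == ch:
--             flag = True
--         else:
--             flag = False
--     return flag
-- ===== SOURCE B (Python) =====
-- def check_1_char(string, T):
--     return string[0] in T and string[0] == string[-1]
-- ===== Notes on version B (the rewrite author's own statement) =====
-- stated objective: simpler
-- what changed: A's loop overwrites flag every iteration so only the last character matters; B drops the loop and returns the closed-form boolean string[0] in T and string[0] == string[-1].
import Mathlib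
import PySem

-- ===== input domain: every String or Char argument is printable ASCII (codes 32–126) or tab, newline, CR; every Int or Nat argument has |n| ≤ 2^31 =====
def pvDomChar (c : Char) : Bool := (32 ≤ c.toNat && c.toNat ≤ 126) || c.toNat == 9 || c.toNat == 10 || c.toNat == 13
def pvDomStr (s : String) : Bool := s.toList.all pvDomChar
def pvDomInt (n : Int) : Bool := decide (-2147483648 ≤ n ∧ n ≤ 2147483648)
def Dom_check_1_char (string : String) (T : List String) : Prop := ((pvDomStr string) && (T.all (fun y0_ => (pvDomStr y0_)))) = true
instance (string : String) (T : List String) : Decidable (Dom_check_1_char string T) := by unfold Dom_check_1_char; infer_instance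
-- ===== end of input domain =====

-- B replaces A's dead loop (flag is overwritten each iteration) with the closed-form
-- boolean string[0] in T and string[0] == string[-1]; objective: simpler.


-- ===== PORT A =====
def check_1_char (string : String) (T : List String) : Bool :=
  match PySem.Str.pyGet? string 0 with
  | none => false   -- string[0] raises IndexError on ""; excluded by Pre_
  | some c =>
      string.toList.foldl (fun _flag ch => decide (String.ofList [c] ∈ T) && (c == ch)) false

-- ===== PORT B =====
def check_1_char_alt (string : String) (T : List String) : Bool :=
  match PySem.Str.pyGet? string 0, PySem.Str.pyGet? string (-1) with
  | some c0, some cl => decide (String.ofList [c0] ∈ T) && (c0 == cl)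
  | _, _ => false   -- string[0] raises IndexError on ""; excluded by Pre_

-- ===== PRECONDITION & SPEC =====
-- Pre_ excludes the empty string, on which A (and B) raise IndexError at string[0].
def Pre_check_1_char (string : String) (T : List String) : Prop := string.toList ≠ []
instance (string : String) (T : List String) : Decidable (Pre_check_1_char string T) := by unfold Pre_check_1_char; infer_instance
def pvWitness_check_1_char : String × List String := ("aba", ["a", "b"])
def Spec_check_1_char (string : String) (T : List String) (out : Bool) : Prop := out = check_1_char_alt string T
instance (string : String) (T : List String) (out : Bool) : Decidable (Spec_check_1_char string T out) := by unfold Spec_check_1_char; infer_instance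

-- ===== CLAIM (what is proved, stated in full; the proofs are below) =====
def Claim_equal_check_1_char : Prop := ∀ (string : String) (T : List String), Dom_check_1_char string T → Pre_check_1_char string T → Spec_check_1_char string T (check_1_char string T)

-- ===== LEMMAS AND PROOFS =====
-- A's loop ignores the accumulator, so it computes g of the last character.
theorem foldl_ignore_acc (g : Char → Bool) :
    ∀ (l : List Char) (h : l ≠ []) (a : Bool),
      l.foldl (fun _ ch => g ch) a = g (l.getLast h) := by
  intro l
  induction l with
  | nil => intro h; exact absurd rfl h
  | cons x xs ih =>
      intro h a
      cases xs with
      | nil => simp [List.foldl]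
      | cons y ys =>
          have hih := ih (by simp) a
          simp only [List.foldl] at hih ⊢
          rw [hih]
          simp [List.getLast]

-- ===== VERDICT (by name: the statement is the Claim_ definition above) =====
theorem check_1_char_spec : Claim_equal_check_1_char := by
  intro string T _ hpre
  unfold Spec_check_1_char check_1_char check_1_char_alt
  have h0 : PySem.Str.pyGet? string 0 = string.toList[0]? := by
    simpa using PySem.Str.pyGet?_natCast string 0
  have hm1 : PySem.Str.pyGet? string (-1) = string.toList.getLast? := by
    simp [PySem.Str.pyGet?, PySem.List.pyGet?_neg_one]
  cases hl : string.toList with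
  | nil => exact absurd hl hpre
  | cons x xs =>
      have hne : x :: xs ≠ [] := by simp
      rw [h0, hm1, hl]
      simp only [List.getElem?_cons_zero, List.getLast?_eq_getLast_of_ne_nil hne]
      rw [foldl_ignore_acc (fun ch => decide (String.ofList [x] ∈ T) && (x == ch)) (x :: xs) hne]
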